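-- pv_equiv track=rewrite | github.com/fuyuxiang/data-chat-bot | backend/app/api/queries.py | _resolve_scoped_table_name
-- ===== SOURCE A (Python) =====
-- from typing import Any, Dict, List, Optional, Tuple
--
-- def _normalize_table_name(name: str) -> str:
--     """标准化表名（与 DuckDB 加载逻辑保持一致）"""
--     if not name:
--         return ""
--     table_name = name
--     if table_name.endswith(".csv"):
--         table_name = table_name[:-4]
--     if "_" in table_name:
--         parts = table_name.split("_", 1)
--         if len(parts[0]) == 8 and parts[0].isdigit():
--             table_name = parts[1]
--     return table_name.replace("-", "_").replace(".", "_")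
--
-- def _resolve_scoped_table_name(raw_name: str, allowed_tables: List[str]) -> Optional[str]:
--     """将手工 SQL 中的表名解析到当前数据集作用域表。"""
--     if not raw_name:
--         return None
--
--     name = raw_name.strip().strip('"').strip("`")
--     if not name:
--         return None
--
--     low = name.lower()
--     normalized = _normalize_table_name(name).lower()
--     allowed = [t for t in (allowed_tables or []) if t]
--     if not allowed:
--         return None
--
--     direct_map: Dict[str, str] = {}
--     unscoped_pairs: List[Tuple[str, str]] = []
--     for scoped in allowed:
--         scoped_low = scoped.lower()
--         direct_map[scoped_low] = scoped
--
--         unscoped = scoped.split("_", 1)[1] if scoped_low.startswith("ds") and "_" in scoped else scoped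
--         unscoped_low = unscoped.lower()
--         direct_map[unscoped_low] = scoped
--         direct_map[_normalize_table_name(unscoped).lower()] = scoped
--         unscoped_pairs.append((scoped, unscoped_low))
--
--     if low in direct_map:
--         return direct_map[low]
--     if normalized in direct_map:
--         return direct_map[normalized]
--
--     # 允许前缀匹配（仅在唯一命中时生效），兼容手工省略后缀的表名
--     prefix_hits = [scoped for scoped, unscoped_low in unscoped_pairs if unscoped_low.startswith(low)]
--     if len(prefix_hits) == 1:
--         return prefix_hits[0]
--     normalized_prefix_hits = [scoped for scoped, unscoped_low in unscoped_pairs if unscoped_low.startswith(normalized)]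
--     if len(normalized_prefix_hits) == 1:
--         return normalized_prefix_hits[0]
--
--     return None
-- ===== SOURCE B (Python) =====
-- from typing import List, Optional
--
--
-- def _normalize_table_name(name: str) -> str:
--     if not name:
--         return ""
--     table_name = name
--     if table_name.endswith(".csv"):
--         table_name = table_name[:-4]
--     if "_" in table_name:
--         parts = table_name.split("_", 1)
--         if len(parts[0]) == 8 and parts[0].isdigit():
--             table_name = parts[1]
--     return table_name.replace("-", "_").replace(".", "_")
--
--
-- def _candidate_keys(scoped: str):
--     """(scoped_low, unscoped_low, normalized_unscoped_low) for one allowed entry."""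
--     scoped_low = scoped.lower()
--     unscoped = scoped.split("_", 1)[1] if scoped_low.startswith("ds") and "_" in scoped else scoped
--     unscoped_low = unscoped.lower()
--     return scoped_low, unscoped_low, _normalize_table_name(unscoped).lower()
--
--
-- def _resolve_scoped_table_name(raw_name: str, allowed_tables: List[str]) -> Optional[str]:
--     if not raw_name:
--         return None
--     name = raw_name.strip().strip('"').strip("`")
--     if not name:
--         return None
--     low = name.lower()
--     normalized = _normalize_table_name(name).lower()
--     allowed = [t for t in (allowed_tables or []) if t]
--     if not allowed:
--         return None
--
--     # exact phases: last allowed entry whose key-set contains the query (dict last-write-wins)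
--     for key in (low, normalized):
--         hit = None
--         for scoped in allowed:
--             if key in _candidate_keys(scoped):
--                 hit = scoped
--         if hit is not None:
--             return hit
--
--     # prefix phases: unique entry whose unscoped form starts with the query
--     for key in (low, normalized):
--         hits = [scoped for scoped in allowed if _candidate_keys(scoped)[1].startswith(key)]
--         if len(hits) == 1:
--             return hits[0]
--     return None
-- ===== Notes on version B (the rewrite author's own statement) =====
-- stated objective: simpler
-- what changed: B drops A's precomputed direct_map dict and unscoped_pairs list and resolves by direct scans over allowed: two last-match scans for the exact phases (reproducing the dict's last-write-wins) and two unique-prefix filters, maintaining no index structure.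
import Mathlib
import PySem

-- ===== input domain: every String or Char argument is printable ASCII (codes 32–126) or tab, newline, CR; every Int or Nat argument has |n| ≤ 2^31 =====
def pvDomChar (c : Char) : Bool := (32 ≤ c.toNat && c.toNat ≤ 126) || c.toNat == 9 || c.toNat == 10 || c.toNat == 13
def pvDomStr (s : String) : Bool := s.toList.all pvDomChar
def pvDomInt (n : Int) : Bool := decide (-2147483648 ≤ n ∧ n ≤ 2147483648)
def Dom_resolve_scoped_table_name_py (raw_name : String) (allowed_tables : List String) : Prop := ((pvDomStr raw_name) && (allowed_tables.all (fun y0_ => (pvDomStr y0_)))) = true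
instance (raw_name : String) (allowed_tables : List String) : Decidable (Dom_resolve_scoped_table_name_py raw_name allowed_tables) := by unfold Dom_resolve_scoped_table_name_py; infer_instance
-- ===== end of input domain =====

-- B drops A's precomputed direct_map/unscoped_pairs and resolves by direct scans over `allowed`
-- (last exact match, then unique prefix match); objective: simpler — no index table is maintained.

-- shared helper: both Pythons call the same module helper _normalize_table_name
def normalize_table_name (name : String) : String :=
  if PySem.Str.len name = 0 then "" else
  let t1 := if PySem.Str.endswith name ".csv" then PySem.Str.slice name none (some (-4)) else name
  let t2 :=
    if PySem.Str.isIn "_" t1 then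
      -- split("_", 1): sep ≠ "" so splitMax? is always `some`, with ≥ 2 parts when "_" ∈ t1
      let parts := (PySem.Str.splitMax? t1 "_" 1).getD []
      if PySem.Str.len (parts.getD 0 "") = 8 && PySem.Str.strIsdigit (parts.getD 0 "") then
        parts.getD 1 ""
      else t1
    else t1
  PySem.Str.replace (PySem.Str.replace t2 "-" "_") "." "_"

-- ===== PORT A =====
def resolve_scoped_table_name_py (raw_name : String) (allowed_tables : List String) : Option String :=
  if PySem.Str.len raw_name = 0 then none else
  let name := PySem.Str.stripChars (PySem.Str.stripChars (PySem.Str.strip raw_name) "\"") "`"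
  if PySem.Str.len name = 0 then none else
  let low := PySem.Str.lower name
  let normalized := PySem.Str.lower (normalize_table_name name)
  let allowed := allowed_tables.filter (fun t => PySem.Str.len t ≠ 0)
  if allowed.isEmpty then none else
  -- one loop building direct_map (dict, last write wins) and unscoped_pairs
  let st := allowed.foldl (fun (acc : PySem.Dict String String × List (String × String)) sc =>
      let scoped_low := PySem.Str.lower sc
      let d1 := acc.1.insert scoped_low sc
      let unscoped := if PySem.Str.startswith scoped_low "ds" && PySem.Str.isIn "_" sc
                      then ((PySem.Str.splitMax? sc "_" 1).getD []).getD 1 "" else sc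
      let unscoped_low := PySem.Str.lower unscoped
      let d2 := d1.insert unscoped_low sc
      let d3 := d2.insert (PySem.Str.lower (normalize_table_name unscoped)) sc
      (d3, acc.2 ++ [(sc, unscoped_low)]))
    (PySem.Dict.empty, [])
  match st.1.get? low with
  | some v => some v
  | none =>
  match st.1.get? normalized with
  | some v => some v
  | none =>
  let prefix_hits := st.2.filter (fun p => PySem.Str.startswith p.2 low)
  if prefix_hits.length = 1 then some (prefix_hits.headD ("", "")).1 else
  let normalized_prefix_hits := st.2.filter (fun p => PySem.Str.startswith p.2 normalized)
  if normalized_prefix_hits.length = 1 then some (normalized_prefix_hits.headD ("", "")).1 else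
  none

-- ===== PORT B =====
-- the three candidate keys of one allowed entry
def candidate_keys (sc : String) : String × String × String :=
  let scoped_low := PySem.Str.lower sc
  let unscoped := if PySem.Str.startswith scoped_low "ds" && PySem.Str.isIn "_" sc
                  then ((PySem.Str.splitMax? sc "_" 1).getD []).getD 1 "" else sc
  let unscoped_low := PySem.Str.lower unscoped
  (scoped_low, unscoped_low, PySem.Str.lower (normalize_table_name unscoped))

-- last entry of `allowed` whose candidate keys contain `key`
def last_hit (key : String) (allowed : List String) : Option String :=
  allowed.foldl (fun hit sc =>
    let k := candidate_keys sc
    if key = k.1 ∨ key = k.2.1 ∨ key = k.2.2 then some sc else hit) none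

def resolve_scoped_table_name_py_alt (raw_name : String) (allowed_tables : List String) : Option String :=
  if PySem.Str.len raw_name = 0 then none else
  let name := PySem.Str.stripChars (PySem.Str.stripChars (PySem.Str.strip raw_name) "\"") "`"
  if PySem.Str.len name = 0 then none else
  let low := PySem.Str.lower name
  let normalized := PySem.Str.lower (normalize_table_name name)
  let allowed := allowed_tables.filter (fun t => PySem.Str.len t ≠ 0)
  if allowed.isEmpty then none else
  -- exact phases (key = low, then normalized), each a full scan keeping the last match
  match last_hit low allowed with
  | some h => some h
  | none =>
  match last_hit normalized allowed with
  | some h => some h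
  | none =>
  -- prefix phases: unique entry whose unscoped form starts with the key
  let hits := allowed.filter (fun s => PySem.Str.startswith (candidate_keys s).2.1 low)
  if hits.length = 1 then some (hits.headD "") else
  let hits2 := allowed.filter (fun s => PySem.Str.startswith (candidate_keys s).2.1 normalized)
  if hits2.length = 1 then some (hits2.headD "") else
  none

-- ===== PRECONDITION & SPEC =====
def Spec_resolve_scoped_table_name_py (raw_name : String) (allowed_tables : List String) (out : Option String) : Prop := out = resolve_scoped_table_name_py_alt raw_name allowed_tables
instance (raw_name : String) (allowed_tables : List String) (out : Option String) : Decidable (Spec_resolve_scoped_table_name_py raw_name allowed_tables out) := by unfold Spec_resolve_scoped_table_name_py; infer_instance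

-- ===== CLAIM (what is proved, stated in full; the proofs are below) =====
def Claim_equal_resolve_scoped_table_name_py : Prop := ∀ (raw_name : String) (allowed_tables : List String), Dom_resolve_scoped_table_name_py raw_name allowed_tables → Spec_resolve_scoped_table_name_py raw_name allowed_tables (resolve_scoped_table_name_py raw_name allowed_tables)

-- ===== LEMMAS AND PROOFS =====

-- abbreviation for A's loop step (proof-side only; definitionally A's loop body)
def stepA (acc : PySem.Dict String String × List (String × String)) (sc : String) :
    PySem.Dict String String × List (String × String) :=
  let sc_low := PySem.Str.lower sc
  let d1 := acc.1.insert sc_low sc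
  let unsc := if PySem.Str.startswith sc_low "ds" && PySem.Str.isIn "_" sc
                  then ((PySem.Str.splitMax? sc "_" 1).getD []).getD 1 "" else sc
  let unsc_low := PySem.Str.lower unsc
  let d2 := d1.insert unsc_low sc
  let d3 := d2.insert (PySem.Str.lower (normalize_table_name unsc)) sc
  (d3, acc.2 ++ [(sc, unsc_low)])

-- B's loop step for one key
def stepB (key : String) (hit : Option String) (sc : String) : Option String :=
  let k := candidate_keys sc
  if key = k.1 ∨ key = k.2.1 ∨ key = k.2.2 then some sc else hit

lemma stepA_fst (acc : PySem.Dict String String × List (String × String)) (sc : String) :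
    (stepA acc sc).1 =
      ((acc.1.insert (candidate_keys sc).1 sc).insert (candidate_keys sc).2.1 sc).insert
        (candidate_keys sc).2.2 sc := rfl

lemma stepA_snd (acc : PySem.Dict String String × List (String × String)) (sc : String) :
    (stepA acc sc).2 = acc.2 ++ [(sc, (candidate_keys sc).2.1)] := rfl

lemma get?_insert3 (d : PySem.Dict String String) (a b c v key : String) :
    (((d.insert a v).insert b v).insert c v).get? key =
      (if key = a ∨ key = b ∨ key = c then some v else d.get? key) := by
  rw [PySem.Dict.get?_insert, PySem.Dict.get?_insert, PySem.Dict.get?_insert]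
  split_ifs <;> tauto

lemma get?_stepA (acc : PySem.Dict String String × List (String × String)) (sc key : String) :
    (stepA acc sc).1.get? key = stepB key (acc.1.get? key) sc := by
  rw [stepA_fst]
  simp only [stepB]
  exact get?_insert3 acc.1 _ _ _ sc key

-- the dict built by A's loop answers every lookup like B's last-match scan
lemma get?_foldA (l : List String) (acc : PySem.Dict String String × List (String × String))
    (key : String) :
    ((l.foldl stepA acc).1).get? key = l.foldl (stepB key) (acc.1.get? key) := by
  induction l generalizing acc with
  | nil => rfl
  | cons s t ih =>
    rw [List.foldl_cons, List.foldl_cons, ih, get?_stepA]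

-- the pair list built by A's loop is a map over allowed
lemma snd_foldA (l : List String) (acc : PySem.Dict String String × List (String × String)) :
    (l.foldl stepA acc).2 = acc.2 ++ l.map (fun s => (s, (candidate_keys s).2.1)) := by
  induction l generalizing acc with
  | nil => simp
  | cons s t ih =>
    rw [List.foldl_cons, ih, stepA_snd, List.map_cons, List.append_assoc, List.singleton_append]

lemma filter_pairs (l : List String) (key : String) :
    (l.map (fun s => (s, (candidate_keys s).2.1))).filter (fun p => PySem.Str.startswith p.2 key) =
      (l.filter (fun s => PySem.Str.startswith (candidate_keys s).2.1 key)).map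
        (fun s => (s, (candidate_keys s).2.1)) := by
  rw [List.filter_map]; rfl

lemma get?_foldA_empty (l : List String) (key : String) :
    ((l.foldl stepA (PySem.Dict.empty, [])).1).get? key = last_hit key l := by
  rw [get?_foldA]; rfl

lemma snd_foldA_empty (l : List String) :
    (l.foldl stepA (PySem.Dict.empty, [])).2 = l.map (fun s => (s, (candidate_keys s).2.1)) := by
  rw [snd_foldA]; rfl

-- A's body after the guards, with the loop named stepA (definitionally A's term)
def coreA (low normalized : String) (allowed : List String) : Option String :=
  match (allowed.foldl stepA (PySem.Dict.empty, [])).1.get? low with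
  | some v => some v
  | none =>
  match (allowed.foldl stepA (PySem.Dict.empty, [])).1.get? normalized with
  | some v => some v
  | none =>
  if ((allowed.foldl stepA (PySem.Dict.empty, [])).2.filter
        (fun p => PySem.Str.startswith p.2 low)).length = 1 then
    some (((allowed.foldl stepA (PySem.Dict.empty, [])).2.filter
        (fun p => PySem.Str.startswith p.2 low)).headD ("", "")).1
  else if ((allowed.foldl stepA (PySem.Dict.empty, [])).2.filter
        (fun p => PySem.Str.startswith p.2 normalized)).length = 1 then
    some (((allowed.foldl stepA (PySem.Dict.empty, [])).2.filter
        (fun p => PySem.Str.startswith p.2 normalized)).headD ("", "")).1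
  else none

-- B's body after the guards (definitionally B's term)
def coreB (low normalized : String) (allowed : List String) : Option String :=
  match last_hit low allowed with
  | some h => some h
  | none =>
  match last_hit normalized allowed with
  | some h => some h
  | none =>
  if (allowed.filter (fun s => PySem.Str.startswith (candidate_keys s).2.1 low)).length = 1 then
    some ((allowed.filter (fun s => PySem.Str.startswith (candidate_keys s).2.1 low)).headD "")
  else if (allowed.filter (fun s => PySem.Str.startswith (candidate_keys s).2.1 normalized)).length = 1 then
    some ((allowed.filter (fun s => PySem.Str.startswith (candidate_keys s).2.1 normalized)).headD "")
  else none

lemma core_eq (low normalized : String) (allowed : List String) :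
    coreA low normalized allowed = coreB low normalized allowed := by
  unfold coreA coreB
  rw [get?_foldA_empty, get?_foldA_empty, snd_foldA_empty, filter_pairs, filter_pairs]
  cases last_hit low allowed with
  | some v => rfl
  | none =>
    cases last_hit normalized allowed with
    | some v => rfl
    | none =>
      simp only [List.length_map]
      cases hfl : allowed.filter (fun s => PySem.Str.startswith (candidate_keys s).2.1 low) with
      | nil =>
        simp only [List.map_nil]
        cases hfn : allowed.filter (fun s => PySem.Str.startswith (candidate_keys s).2.1 normalized) with
        | nil => rfl
        | cons a t => cases t <;> rfl
      | cons a t =>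
        cases t with
        | nil => rfl
        | cons b t2 =>
          simp only [List.map_cons, List.length_cons]
          cases hfn : allowed.filter (fun s => PySem.Str.startswith (candidate_keys s).2.1 normalized) with
          | nil => rfl
          | cons a2 t3 => cases t3 <;> rfl

-- ===== VERDICT (by name: the statement is the Claim_ definition above) =====
theorem resolve_scoped_table_name_py_spec : Claim_equal_resolve_scoped_table_name_py := by
  intro raw_name allowed_tables _
  unfold Spec_resolve_scoped_table_name_py
  unfold resolve_scoped_table_name_py resolve_scoped_table_name_py_alt
  simp only []
  by_cases h1 : PySem.Str.len raw_name = 0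
  · rw [if_pos h1, if_pos h1]
  · rw [if_neg h1, if_neg h1]
    by_cases h2 : PySem.Str.len (PySem.Str.stripChars (PySem.Str.stripChars (PySem.Str.strip raw_name) "\"") "`") = 0
    · rw [if_pos h2, if_pos h2]
    · rw [if_neg h2, if_neg h2]
      by_cases h3 : (allowed_tables.filter (fun t => PySem.Str.len t ≠ 0)).isEmpty = true
      · rw [if_pos h3, if_pos h3]
      · rw [if_neg h3, if_neg h3]
        exact core_eq
          (PySem.Str.lower (PySem.Str.stripChars (PySem.Str.stripChars (PySem.Str.strip raw_name) "\"") "`"))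
          (PySem.Str.lower (normalize_table_name (PySem.Str.stripChars (PySem.Str.stripChars (PySem.Str.strip raw_name) "\"") "`")))
          (allowed_tables.filter (fun t => PySem.Str.len t ≠ 0))
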